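-- pv_equiv track=rewrite | github.com/raold/second-brain | app/insights/cluster_analyzer.py | _extract_cluster_keywords
-- ===== SOURCE A (Python) =====
-- from collections import Counter, defaultdict
-- from typing import Any
--
-- def _extract_cluster_keywords(
--
--     memories: list[dict[str, Any]],
--     max_keywords: int = 10
-- ) -> list[str]:
--     """Extract representative keywords from cluster"""
--     # Simple keyword extraction from content
--     word_freq = defaultdict(int)
--
--     for memory in memories:
--         content = memory.get('content', '').lower()
--         # Simple tokenization
--         words = content.split()
--
--         for word in words:
--             if len(word) > 4:  # Skip short words
--                 word_freq[word] += 1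
--
--     # Get most frequent words
--     keywords = [
--         word for word, _ in sorted(
--             word_freq.items(),
--             key=lambda x: x[1],
--             reverse=True
--         )[:max_keywords]
--     ]
--
--     return keywords
-- ===== SOURCE B (Python) =====
-- from collections import Counter, defaultdict
--
--
-- def _extract_cluster_keywords(memories, max_keywords=10):
--     """Extract representative keywords from cluster (bucket/counting-sort version)."""
--     word_freq = Counter(
--         word
--         for memory in memories
--         for word in memory.get('content', '').lower().split()
--         if len(word) > 4
--     )
--     if not word_freq:
--         return []
--     # frequency -> words, each bucket in first-seen order
--     buckets = defaultdict(list)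
--     for word, freq in word_freq.items():
--         buckets[freq].append(word)
--     result = []
--     for f in range(max(word_freq.values()), 0, -1):
--         result.extend(buckets[f])
--     return result[:max_keywords]
-- ===== Notes on version B (the rewrite author's own statement) =====
-- stated objective: alternative
-- what changed: Replaces the comparison sort of (word, freq) pairs by a counting-sort: words are grouped into frequency buckets in first-seen order and the buckets are emitted from the maximal frequency down to 1, reproducing the stable descending order without calling sorted().
import Mathlib
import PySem

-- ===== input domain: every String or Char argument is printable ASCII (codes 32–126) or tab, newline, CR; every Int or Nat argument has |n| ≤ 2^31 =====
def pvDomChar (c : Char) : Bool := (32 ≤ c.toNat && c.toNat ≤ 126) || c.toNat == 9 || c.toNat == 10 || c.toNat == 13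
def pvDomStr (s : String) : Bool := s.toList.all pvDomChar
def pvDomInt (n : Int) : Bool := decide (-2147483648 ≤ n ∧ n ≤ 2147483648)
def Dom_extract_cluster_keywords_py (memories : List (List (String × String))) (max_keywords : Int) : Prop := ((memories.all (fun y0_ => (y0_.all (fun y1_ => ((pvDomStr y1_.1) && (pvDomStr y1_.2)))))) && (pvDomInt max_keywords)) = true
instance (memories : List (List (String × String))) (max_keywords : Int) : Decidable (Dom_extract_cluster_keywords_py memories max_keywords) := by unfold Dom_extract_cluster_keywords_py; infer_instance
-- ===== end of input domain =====

-- B replaces A's comparison sort of (word, freq) pairs by a counting-sort over frequency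
-- buckets emitted from the maximal frequency downwards (objective: alternative algorithm).

-- ===== PORT A =====
def extract_cluster_keywords_py (memories : List (List (String × String))) (max_keywords : Int) : List String :=
  let word_freq :=
    memories.foldl (fun d memory =>
      let content := PySem.Str.lower ((PySem.Dict.mk memory).getD "content" "")
      let words := PySem.Str.split₀ content
      words.foldl (fun d word =>
        if PySem.Str.len word > 4 then d.modify word 0 (fun c => c + 1) else d) d)
      (PySem.Dict.empty : PySem.Dict String Int)
  (PySem.List.slice (PySem.List.sorted word_freq.items (fun x => x.2) true) none (some max_keywords)).map
    (fun p => p.1)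

-- ===== PORT B =====
def extract_cluster_keywords_py_alt (memories : List (List (String × String))) (max_keywords : Int) : List String :=
  let ws := memories.flatMap (fun memory =>
    (PySem.Str.split₀ (PySem.Str.lower ((PySem.Dict.mk memory).getD "content" ""))).filter
      (fun word => PySem.Str.len word > 4))
  let word_freq := PySem.Dict.counter ws
  if word_freq.items.isEmpty then []
  else
    let buckets :=
      word_freq.items.foldl (fun d p => d.modify p.2 [] (fun l => l ++ [p.1])) PySem.Dict.empty
    match PySem.List.max? word_freq.values (fun v => v) with
    | none => []   -- unreachable totality guard: values is nonempty here
    | some M =>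
      let result := (PySem.List.pyRange M 0 (-1)).foldl (fun acc f => acc ++ buckets.getD f []) []
      PySem.List.slice result none (some max_keywords)

-- ===== PRECONDITION & SPEC =====
def Spec_extract_cluster_keywords_py (memories : List (List (String × String))) (max_keywords : Int) (out : List String) : Prop := out = extract_cluster_keywords_py_alt memories max_keywords
instance (memories : List (List (String × String))) (max_keywords : Int) (out : List String) : Decidable (Spec_extract_cluster_keywords_py memories max_keywords out) := by unfold Spec_extract_cluster_keywords_py; infer_instance

-- ===== CLAIM (what is proved, stated in full; the proofs are below) =====
def Claim_equal_extract_cluster_keywords_py : Prop := ∀ (memories : List (List (String × String))) (max_keywords : Int), Dom_extract_cluster_keywords_py memories max_keywords → Spec_extract_cluster_keywords_py memories max_keywords (extract_cluster_keywords_py memories max_keywords)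

-- ===== LEMMAS AND PROOFS =====

-- unfolding equation for PySem.List.insertBy
theorem insertBy_cons {α : Type} (before : α → α → Bool) (x y : α) (ys : List α) :
    PySem.List.insertBy before x (y :: ys) =
      if before x y then x :: y :: ys else y :: PySem.List.insertBy before x ys := rfl

theorem insertBy_append_of_all_false {α : Type} (before : α → α → Bool) (x : α)
    (L1 L2 : List α) (h : ∀ y ∈ L1, before x y = false) :
    PySem.List.insertBy before x (L1 ++ L2) = L1 ++ PySem.List.insertBy before x L2 := by
  induction L1 with
  | nil => simp
  | cons a t ih =>
    have ha : before x a = false := h a (by simp)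
    simp [insertBy_cons, ha, ih (fun y hy => h y (by simp [hy]))]

theorem insertBy_of_all_true {α : Type} (before : α → α → Bool) (x : α)
    (L : List α) (h : ∀ y ∈ L, before x y = true) :
    PySem.List.insertBy before x L = x :: L := by
  cases L with
  | nil => rfl
  | cons a t => simp [insertBy_cons, h a (by simp)]

-- inserting one pair into the bucket concatenation appends it to its bucket
theorem ins_bucket (x : String × Int) (items : List (String × Int)) (fs : List Int)
    (hfs : fs.Pairwise (· > ·)) (hx : x.2 ∈ fs) :
    PySem.List.insertBy (fun a b => decide (b.2 < a.2)) x
        (fs.flatMap (fun f => items.filter (fun p => p.2 == f)))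
      = fs.flatMap (fun f => (items ++ [x]).filter (fun p => p.2 == f)) := by
  induction fs with
  | nil => simp at hx
  | cons f fs' ih =>
    have hgt : ∀ f' ∈ fs', f > f' := (List.pairwise_cons.mp hfs).1
    have hfs' : fs'.Pairwise (· > ·) := (List.pairwise_cons.mp hfs).2
    by_cases hxf : x.2 = f
    · -- x lands at the end of bucket f; later buckets are unchanged
      have hrest : ∀ y ∈ fs'.flatMap (fun f' => items.filter (fun p => p.2 == f')),
          (decide (y.2 < x.2) : Bool) = true := by
        intro y hy
        obtain ⟨f', hf', hyf⟩ := List.mem_flatMap.mp hy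
        have : y.2 = f' := by simpa using (List.mem_filter.mp hyf).2
        simp [this, hxf, hgt f' hf']
      have hbkt : ∀ y ∈ items.filter (fun p => p.2 == f),
          (decide (y.2 < x.2) : Bool) = false := by
        intro y hy
        have : y.2 = f := by simpa using (List.mem_filter.mp hy).2
        simp [this, hxf]
      have hsame : fs'.flatMap (fun f' => (items ++ [x]).filter (fun p => p.2 == f'))
          = fs'.flatMap (fun f' => items.filter (fun p => p.2 == f')) := by
        refine List.flatMap_congr (fun f' hf' => ?_)
        have hne : x.2 ≠ f' := by
          have := hgt f' hf'; omega
        simp [List.filter_append, hne]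
      simp only [List.flatMap_cons, hsame]
      rw [insertBy_append_of_all_false _ _ _ _ hbkt,
          insertBy_of_all_true _ _ _ hrest]
      simp [List.filter_append, hxf]
    · -- x belongs to a later bucket
      have hx' : x.2 ∈ fs' := by
        rcases List.mem_cons.mp hx with h | h
        · exact absurd h hxf
        · exact h
      have hbkt : ∀ y ∈ items.filter (fun p => p.2 == f),
          (decide (y.2 < x.2) : Bool) = false := by
        intro y hy
        have hyf : y.2 = f := by simpa using (List.mem_filter.mp hy).2
        have : x.2 < f := hgt _ hx'
        simp [hyf]; omega
      simp only [List.flatMap_cons]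
      rw [insertBy_append_of_all_false _ _ _ _ hbkt, ih hfs' hx']
      have : (items ++ [x]).filter (fun p => p.2 == f) = items.filter (fun p => p.2 == f) := by
        simp [List.filter_append, hxf]
      rw [this]

-- stable descending sort by the Int component = concatenation of frequency buckets
theorem sorted_eq_buckets (items : List (String × Int)) (fs : List Int)
    (hfs : fs.Pairwise (· > ·)) (hmem : ∀ p ∈ items, p.2 ∈ fs) :
    PySem.List.sorted items (fun p => p.2) true
      = fs.flatMap (fun f => items.filter (fun p => p.2 == f)) := by
  induction items using List.reverseRecOn with
  | nil => simp [PySem.List.sorted]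
  | append_singleton t x ih =>
    rw [PySem.List.sorted_rev_eq_foldl_insertBy, List.foldl_append]
    simp only [List.foldl_cons, List.foldl_nil]
    rw [← PySem.List.sorted_rev_eq_foldl_insertBy,
        ih (fun p hp => hmem p (by simp [hp]))]
    exact ins_bucket x t fs hfs (hmem x (by simp))

-- slicing commutes with map
theorem slice_map {α β : Type} (g : α → β) (xs : List α) (a b : Option Int) :
    PySem.List.slice (xs.map g) a b = (PySem.List.slice xs a b).map g := by
  cases a <;> cases b <;>
    simp [PySem.List.slice, List.map_take, List.map_drop]

-- A's nested counting loop computes Counter(ws) for ws = the flatMap of filtered words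
theorem a_freq_eq (memories : List (List (String × String))) :
    memories.foldl (fun d memory =>
        (PySem.Str.split₀ (PySem.Str.lower ((PySem.Dict.mk memory).getD "content" ""))).foldl
          (fun d word =>
            if PySem.Str.len word > 4 then d.modify word 0 (fun c => c + 1) else d) d)
      (PySem.Dict.empty : PySem.Dict String Int)
    = PySem.Dict.counter (memories.flatMap (fun memory =>
        (PySem.Str.split₀ (PySem.Str.lower ((PySem.Dict.mk memory).getD "content" ""))).filter
          (fun word => PySem.Str.len word > 4))) := by
  rw [PySem.Dict.counter_eq_foldl]
  induction memories using List.reverseRecOn with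
  | nil => rfl
  | append_singleton t m ih =>
    rw [List.foldl_append, List.flatMap_append, List.foldl_append, ← ih]
    simp only [List.foldl_cons, List.foldl_nil, List.flatMap_cons, List.flatMap_nil,
      List.append_nil]
    exact PySem.List.foldl_ite_eq_foldl_filter _ _ _ _

-- ===== VERDICT (by name: the statement is the Claim_ definition above) =====
theorem extract_cluster_keywords_py_spec : Claim_equal_extract_cluster_keywords_py := by
  intro memories max_keywords _
  unfold Spec_extract_cluster_keywords_py
  simp only [extract_cluster_keywords_py, extract_cluster_keywords_py_alt]
  rw [a_freq_eq]
  
  set ws := memories.flatMap (fun memory =>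
    (PySem.Str.split₀ (PySem.Str.lower ((PySem.Dict.mk memory).getD "content" ""))).filter
      (fun word => PySem.Str.len word > 4)) with hws
  by_cases hempty : (PySem.Dict.counter ws).items.isEmpty
  · have : (PySem.Dict.counter ws).items = [] := by
      simpa [List.isEmpty_iff] using hempty
    simp [this, PySem.List.sorted, PySem.List.slice]
  · rw [if_neg hempty]
    set items := (PySem.Dict.counter ws).items with hitems
    have hitems' : items = (PySem.Set.ofList ws).map (fun k => (k, (ws.count k : Int))) :=
      PySem.Dict.items_counter ws
    -- every count is positive
    have hpos : ∀ p ∈ items, 0 < p.2 := by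
      intro p hp
      rw [hitems'] at hp
      obtain ⟨k, hk, rfl⟩ := List.mem_map.mp hp
      have : k ∈ ws := (PySem.Set.mem_ofList ws k).mp hk
      have := List.count_pos_iff.mpr this
      simpa using this
    -- the maximum exists
    have hvne : (PySem.Dict.counter ws).values ≠ [] := by
      simp only [PySem.Dict.values, ← hitems]
      intro h
      exact hempty (by simp [List.map_eq_nil_iff.mp h])
    obtain ⟨M, hM⟩ : ∃ M, PySem.List.max? (PySem.Dict.counter ws).values (fun v => v) = some M := by
      cases h : PySem.List.max? (PySem.Dict.counter ws).values (fun v => v) with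
      | none => exact absurd ((PySem.List.max?_eq_none_iff _ _).mp h) hvne
      | some M => exact ⟨M, rfl⟩
    simp only [hM]
    have hMmax : ∀ p ∈ items, p.2 ≤ M := by
      intro p hp
      exact PySem.List.max?_isMax hM p.2 (by
        simp only [PySem.Dict.values, ← hitems]
        exact List.mem_map.mpr ⟨p, hp, rfl⟩)
    -- the countdown range is strictly decreasing and covers every count
    have hfs : (PySem.List.pyRange M 0 (-1)).Pairwise (· > ·) := by
      rw [PySem.List.pyRange_neg_one]
      refine List.Pairwise.map _ (fun a b h => ?_) List.pairwise_lt_range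
      omega
    have hmem : ∀ p ∈ items, p.2 ∈ PySem.List.pyRange M 0 (-1) := by
      intro p hp
      exact PySem.List.mem_pyRange_neg_one.mpr ⟨hpos p hp, hMmax p hp⟩
    -- buckets lookup = filter of items
    have hbucket : ∀ f : Int,
        (items.foldl (fun d p => d.modify p.2 [] (fun l => l ++ [p.1])) PySem.Dict.empty).getD f []
          = (items.filter (fun p => p.2 == f)).map (fun p => p.1) := by
      intro f
      have := PySem.Dict.getD_foldl_modify_append
        (items.map (fun p => (p.2, p.1))) (PySem.Dict.empty) f
      rw [List.foldl_map] at this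
      rw [this]
      simp [List.filter_map, Function.comp_def]
    -- assemble
    rw [PySem.List.foldl_append_eq_flatMap]
    simp only [List.nil_append]
    have : ((PySem.List.pyRange M 0 (-1)).flatMap (fun f =>
        (items.foldl (fun d p => d.modify p.2 [] (fun l => l ++ [p.1])) PySem.Dict.empty).getD f []))
        = ((PySem.List.pyRange M 0 (-1)).flatMap (fun f => items.filter (fun p => p.2 == f))).map
            (fun p => p.1) := by
      rw [List.map_flatMap]
      exact List.flatMap_congr (fun f _ => hbucket f)
    rw [this, ← sorted_eq_buckets items _ hfs hmem, slice_map]
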